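-- pv_equiv track=rewrite | github.com/VishalDeoPrasad/InterviewBit | Special Index .py | solve
-- ===== SOURCE A (Python) =====
-- def solve(A):
--     even_pf = [A[0]]
--     odd_pf = [A[1]]
--     for i in range(2, len(A)):
--         if i % 2 == 0:
--             even_pf.append(even_pf[-1]+A[i])
--         else:
--             odd_pf.append(odd_pf[-1]+A[i])
--     return even_pf, odd_pf
-- ===== SOURCE B (Python) =====
-- def _prefix_sums(xs):
--     out = []
--     total = 0
--     for x in xs:
--         total += x
--         out.append(total)
--     return out
--
--
-- def solve(A):
--     return _prefix_sums(A[0::2]), _prefix_sums(A[1::2])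
-- ===== Notes on version B (the rewrite author's own statement) =====
-- stated objective: idiomatic
-- what changed: Instead of one interleaved index loop with an i % 2 branch and tail-peeking appends, B slices the even- and odd-position subsequences (A[0::2], A[1::2]) and turns each into running totals with a plain accumulator pass.
-- outside the precondition, e.g. on solve([]): A raises IndexError, B returns ([], []); on solve([5]): A raises IndexError, B returns ([5], [])
-- crash fix: On lists of length < 2 A raises IndexError (it eagerly reads the first two elements); B returns the prefix sums of whatever strided elements exist, e.g. ([], []) on [] and ([5], []) on [5]. — e.g. on solve([5]): A raises IndexError, B returns ([5], [])
import Mathlib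
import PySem

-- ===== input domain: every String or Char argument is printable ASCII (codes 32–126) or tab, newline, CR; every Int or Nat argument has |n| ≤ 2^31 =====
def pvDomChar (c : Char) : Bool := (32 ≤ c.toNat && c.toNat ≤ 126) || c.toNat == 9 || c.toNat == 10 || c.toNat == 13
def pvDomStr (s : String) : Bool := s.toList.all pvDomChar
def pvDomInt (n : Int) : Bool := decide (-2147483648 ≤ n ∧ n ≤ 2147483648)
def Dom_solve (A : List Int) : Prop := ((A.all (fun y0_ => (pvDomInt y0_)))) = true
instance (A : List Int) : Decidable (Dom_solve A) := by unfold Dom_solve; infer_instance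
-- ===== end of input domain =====

-- B replaces A's single interleaved index loop (i % 2 branch, append of last+A[i]) by slicing the
-- even/odd strided subsequences and accumulating each with a plain running-total pass (idiomatic).


-- ===== PORT A =====
-- loop body of A: if i % 2 == 0 append to even_pf, else to odd_pf (value = last + A[i])
def solveStep (A : List Int) (s : List Int × List Int) (i : Int) : List Int × List Int :=
  if PySem.Int.mod i 2 = 0 then
    (s.1 ++ [(PySem.List.pyGet? s.1 (-1)).getD 0 + (PySem.List.pyGet? A i).getD 0], s.2)
  else
    (s.1, s.2 ++ [(PySem.List.pyGet? s.2 (-1)).getD 0 + (PySem.List.pyGet? A i).getD 0])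

def solve (A : List Int) : List Int × List Int :=
  (PySem.List.pyRange 2 (A.length : Int) 1).foldl (solveStep A)
    ([(PySem.List.pyGet? A 0).getD 0], [(PySem.List.pyGet? A 1).getD 0])

-- ===== PORT B =====
-- Source B's _prefix_sums: running total, appending each total
def prefixSums (xs : List Int) : List Int :=
  (xs.foldl (fun (p : List Int × Int) x => (p.1 ++ [p.2 + x], p.2 + x)) ([], 0)).1

def solve_alt (A : List Int) : List Int × List Int :=
  (prefixSums ((PySem.List.slice? A (some 0) none 2).getD []),
   prefixSums ((PySem.List.slice? A (some 1) none 2).getD []))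

-- ===== PRECONDITION & SPEC =====
-- A reads the first two elements unconditionally, so it raises IndexError on lists of length < 2.
def Pre_solve (A : List Int) : Prop := 2 ≤ A.length
instance (A : List Int) : Decidable (Pre_solve A) := by unfold Pre_solve; infer_instance
def pvWitness_solve : List Int := [1, -2, 3, 4, 5]

-- On lists of length < 2 A raises IndexError; B returns the prefix sums of whatever strided
-- elements exist.
def Raises_solve (A : List Int) : Prop := A.length < 2
instance (A : List Int) : Decidable (Raises_solve A) := by unfold Raises_solve; infer_instance
def pvRaiseWitness_solve : List Int := [5]
def pvRaiseWitnessOut_solve : List Int × List Int := ([5], [])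

def Spec_solve (A : List Int) (out : List Int × List Int) : Prop := out = solve_alt A
instance (A : List Int) (out : List Int × List Int) : Decidable (Spec_solve A out) := by unfold Spec_solve; infer_instance

-- ===== CLAIM (what is proved, stated in full; the proofs are below) =====
def Claim_equal_solve : Prop := ∀ (A : List Int), Dom_solve A → Pre_solve A → Spec_solve A (solve A)
def Claim_raises_solve : Prop := (∀ (A : List Int), Dom_solve A → Raises_solve A → ¬ Pre_solve A) ∧ (Dom_solve (pvRaiseWitness_solve) ∧ Raises_solve (pvRaiseWitness_solve) ∧ solve_alt (pvRaiseWitness_solve) = pvRaiseWitnessOut_solve)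

-- ===== LEMMAS AND PROOFS =====

-- elements at even positions
def sE : List Int → List Int
  | [] => []
  | [a] => [a]
  | a :: _ :: t => a :: sE t

-- prefix sums starting from running total t
def ps (t : Int) : List Int → List Int
  | [] => []
  | x :: xs => (t + x) :: ps (t + x) xs

theorem ps_append (xs : List Int) (y : Int) : ∀ t, ps t (xs ++ [y]) = ps t xs ++ [t + xs.sum + y] := by
  induction xs with
  | nil => intro t; simp [ps]
  | cons x xs ih => intro t; simp [ps, ih, add_assoc]

theorem ps_getLast? (xs : List Int) (h : xs ≠ []) : ∀ t, (ps t xs).getLast? = some (t + xs.sum) := by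
  induction xs with
  | nil => exact absurd rfl h
  | cons x xs ih =>
    intro t
    cases xs with
    | nil => simp [ps]
    | cons y ys => simpa [ps, add_assoc] using ih (by simp) (t + x)

theorem prefixSums_foldl (xs : List Int) : ∀ (l : List Int) (t : Int),
    xs.foldl (fun (p : List Int × Int) x => (p.1 ++ [p.2 + x], p.2 + x)) (l, t) = (l ++ ps t xs, t + xs.sum) := by
  induction xs with
  | nil => intro l t; simp [ps]
  | cons x xs ih => intro l t; simp [ps, ih, add_assoc]

theorem prefixSums_eq_ps (xs : List Int) : prefixSums xs = ps 0 xs := by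
  simp [prefixSums, prefixSums_foldl]

theorem rangeFilterMap_eq_sE (xs : List Int) :
    (List.range ((xs.length + 1) / 2)).filterMap (fun k => xs[2 * k]?) = sE xs := by
  induction xs using sE.induct with
  | case1 => simp [sE]
  | case2 a => simp [sE]
  | case3 a b t ih =>
    have hlen : (a :: b :: t).length = t.length + 2 := by simp
    rw [hlen, show (t.length + 2 + 1) / 2 = (t.length + 1) / 2 + 1 by omega,
      List.range_succ_eq_map]
    simp only [List.filterMap_cons, List.filterMap_map]
    have h0 : (a :: b :: t)[2 * 0]? = some a := by simp
    rw [h0]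
    have hstep : ∀ k : Nat, (a :: b :: t)[2 * Nat.succ k]? = t[2 * k]? := by
      intro k
      rw [show 2 * Nat.succ k = (2 * k + 1) + 1 by omega]
      simp
    simp only [Function.comp_def, hstep]
    simp [sE, ih]

theorem slice_even (xs : List Int) : PySem.List.slice? xs (some 0) none 2 = some (sE xs) := by
  rw [← rangeFilterMap_eq_sE]
  simp [PySem.List.slice?, PySem.List.sliceIndices]
  rw [show (if 0 < xs.length then (((xs.length : Int) + 2 - 1) / 2).toNat else 0) = (xs.length + 1) / 2 by split <;> omega]
  have hidx : ∀ k : Nat, ((2 : Int) * (k : Int)).toNat = 2 * k := by intro k; omega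
  simp [hidx]

theorem slice_odd (xs : List Int) : PySem.List.slice? xs (some 1) none 2 = some (sE xs.tail) := by
  cases xs with
  | nil => simp [PySem.List.slice?, PySem.List.sliceIndices, sE]
  | cons x t =>
    rw [show (x :: t).tail = t by rfl, ← rangeFilterMap_eq_sE]
    simp [PySem.List.slice?, PySem.List.sliceIndices]
    rw [show (if 0 < t.length then (((t.length : Int) + 2 - 1) / 2).toNat else 0) = (t.length + 1) / 2 by split <;> omega]
    have hidx : ∀ k : Nat, ((1 : Int) + 2 * (k : Int)).toNat = 2 * k + 1 := by intro k; omega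
    simp [hidx]

theorem sE_ne_nil (xs : List Int) (h : xs ≠ []) : sE xs ≠ [] := by
  cases xs with
  | nil => exact absurd rfl h
  | cons a t => cases t <;> simp [sE]

theorem sE_append (xs : List Int) (y : Int) :
    sE (xs ++ [y]) = if xs.length % 2 = 0 then sE xs ++ [y] else sE xs := by
  induction xs using sE.induct with
  | case1 => simp [sE]
  | case2 a => simp [sE]
  | case3 a b t ih =>
    have : (a :: b :: t).length % 2 = t.length % 2 := by simp; omega
    rw [show (a :: b :: t) ++ [y] = a :: b :: (t ++ [y]) by simp, sE, this, ih]
    split_ifs <;> simp [sE]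

theorem tail_append_singleton (xs : List Int) (y : Int) (h : xs ≠ []) :
    (xs ++ [y]).tail = xs.tail ++ [y] := by
  cases xs with
  | nil => exact absurd rfl h
  | cons a t => simp

theorem solve_inv (A : List Int) (n : Nat) (h2 : 2 ≤ n) (hn : n ≤ A.length) :
    (PySem.List.pyRange 2 (n : Int) 1).foldl (solveStep A)
      ([(PySem.List.pyGet? A 0).getD 0], [(PySem.List.pyGet? A 1).getD 0])
    = (ps 0 (sE (A.take n)), ps 0 (sE (A.take n).tail)) := by
  induction n, h2 using Nat.le_induction with
  | base =>
    obtain ⟨a, b, t, rfl⟩ : ∃ a b t, A = a :: b :: t := by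
      cases A with
      | nil => simp at hn
      | cons a s => cases s with
        | nil => simp at hn
        | cons b t => exact ⟨a, b, t, rfl⟩
    rw [PySem.List.pyRange_one_eq_nil (by omega), List.foldl_nil]
    have h1 : PySem.List.pyGet? (a :: b :: t) 1 = some b := by
      rw [show (1 : Int) = ((1 : Nat) : Int) by norm_num, PySem.List.pyGet?_natCast]
      rfl
    rw [PySem.List.pyGet?_zero_cons, h1]
    simp [sE, ps]
  | succ n hge ih =>
    have hnle : n ≤ A.length := by omega
    have hnlt : n < A.length := by omega
    rw [show ((n + 1 : Nat) : Int) = (n : Int) + 1 by push_cast; ring,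
      PySem.List.pyRange_one_succ_right (by exact_mod_cast hge), List.foldl_append,
      ih hnle, List.foldl_cons, List.foldl_nil]
    have htake : A.take (n + 1) = A.take n ++ [A[n]] := by
      rw [List.take_add_one]
      simp [List.getElem?_eq_getElem hnlt]
    have hget : (PySem.List.pyGet? A (n : Int)).getD 0 = A[n] := by
      rw [PySem.List.pyGet?_natCast]
      simp [List.getElem?_eq_getElem hnlt]
    have htnn : A.take n ≠ [] := by
      have hl : (A.take n).length = n := by simp; omega
      intro hc; rw [hc] at hl; simp at hl; omega
    have hlen : (A.take n).length = n := by simp; omega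
    have hmod : PySem.Int.mod (n : Int) 2 = ((n % 2 : Nat) : Int) :=
      PySem.Int.mod_natCast n 2
    have htail : (A.take (n + 1)).tail = (A.take n).tail ++ [A[n]] := by
      rw [htake, tail_append_singleton _ _ htnn]
    have htaillen : (A.take n).tail.length = n - 1 := by simp [hlen]
    by_cases hpar : n % 2 = 0
    · -- even index: append to even_pf
      have hm0 : PySem.Int.mod (n : Int) 2 = 0 := by rw [hmod, hpar]; rfl
      unfold solveStep
      rw [if_pos hm0, PySem.List.pyGet?_neg_one, hget]
      have hsne : sE (A.take n) ≠ [] := sE_ne_nil _ htnn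
      rw [ps_getLast? _ hsne]
      have hodd : sE (A.take (n + 1)).tail = sE (A.take n).tail := by
        rw [htail, sE_append, htaillen, if_neg (by omega)]
      rw [hodd, htake, sE_append, hlen, if_pos hpar, ps_append]
      simp
    · -- odd index: append to odd_pf
      have hm0 : PySem.Int.mod (n : Int) 2 ≠ 0 := by
        rw [hmod]; exact_mod_cast (by omega : ((n % 2 : Nat) : Int) ≠ 0)
      unfold solveStep
      rw [if_neg hm0, PySem.List.pyGet?_neg_one, hget]
      have htne : (A.take n).tail ≠ [] := by
        intro hc; rw [hc] at htaillen; simp at htaillen; omega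
      have hsne : sE (A.take n).tail ≠ [] := sE_ne_nil _ htne
      rw [ps_getLast? _ hsne]
      have heven : sE (A.take (n + 1)) = sE (A.take n) := by
        rw [htake, sE_append, hlen, if_neg hpar]
      rw [heven, htail, sE_append, htaillen, if_pos (by omega), ps_append]
      simp

-- ===== VERDICT (by name: the statement is the Claim_ definition above) =====
theorem solve_spec : Claim_equal_solve := by
  intro A _ hpre
  unfold Spec_solve
  unfold Pre_solve at hpre
  have := solve_inv A A.length hpre le_rfl
  unfold solve
  rw [this, List.take_length]
  unfold solve_alt
  rw [slice_even, slice_odd]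
  simp [prefixSums_eq_ps]

def solve_raises : Claim_raises_solve := by
  unfold Claim_raises_solve
  constructor
  · intro A _ hr
    unfold Raises_solve at hr
    unfold Pre_solve
    omega
  · refine ⟨by decide, by decide, by decide⟩
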